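-- pv_equiv track=rewrite | github.com/William-Huang274/Yelp-Offline-Recommendation-Pipeline | scripts/audit_stage11_boundary_constructability.py | _alias_terms_match
-- ===== SOURCE A (Python) =====
-- from typing import Any
--
-- _RECENT_CONTEXT_ALIAS_GROUPS: dict[str, set[str]] = {
--     "late night": {
--         "late night",
--         "late hours",
--         "late night meals",
--         "late night visits",
--         "nightlife",
--         "happy hour",
--         "date night outings",
--         "sit down dinner",
--         "sit down meals",
--     },
--     "fast casual": {
--         "fast casual",
--         "fast casual meals",
--         "quick casual meals",
--         "weekday lunch",
--         "family friendly settings",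
--     },
--     "group dining": {
--         "group dining",
--         "family friendly settings",
--         "celebration",
--         "sit down meals",
--     },
-- }
--
-- def _norm_term(value: Any) -> str:
--     return " ".join(str(value or "").strip().lower().split())
--
-- def _alias_terms_match(left_terms: list[str], right_terms: list[str]) -> list[str]:
--     left = {_norm_term(term) for term in left_terms if _norm_term(term)}
--     right = {_norm_term(term) for term in right_terms if _norm_term(term)}
--     out: list[str] = []
--     for canonical, aliases in _RECENT_CONTEXT_ALIAS_GROUPS.items():
--         alias_norms = {_norm_term(canonical)} | {_norm_term(term) for term in aliases if _norm_term(term)}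
--         if left.intersection(alias_norms) and right.intersection(alias_norms):
--             out.append(canonical)
--     return out
-- ===== SOURCE B (Python) =====
-- from typing import Any
--
-- _RECENT_CONTEXT_ALIAS_GROUPS: dict[str, set[str]] = {
--     "late night": {
--         "late night",
--         "late hours",
--         "late night meals",
--         "late night visits",
--         "nightlife",
--         "happy hour",
--         "date night outings",
--         "sit down dinner",
--         "sit down meals",
--     },
--     "fast casual": {
--         "fast casual",
--         "fast casual meals",
--         "quick casual meals",
--         "weekday lunch",
--         "family friendly settings",
--     },
--     "group dining": {
--         "group dining",
--         "family friendly settings",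
--         "celebration",
--         "sit down meals",
--     },
-- }
--
-- def _norm_term(value: Any) -> str:
--     return " ".join(str(value or "").strip().lower().split())
--
-- # Inverted index built once: normalized alias term -> canonical group names containing it.
-- _ALIAS_INDEX: dict[str, list[str]] = {}
-- for _canonical, _aliases in _RECENT_CONTEXT_ALIAS_GROUPS.items():
--     for _term in (_canonical, *_aliases):
--         _t = _norm_term(_term)
--         if _t and _canonical not in _ALIAS_INDEX.setdefault(_t, []):
--             _ALIAS_INDEX[_t].append(_canonical)
--
-- def _alias_terms_match(left_terms: list[str], right_terms: list[str]) -> list[str]: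
--     left_groups = {g for t in left_terms for g in _ALIAS_INDEX.get(_norm_term(t), ())}
--     right_groups = {g for t in right_terms for g in _ALIAS_INDEX.get(_norm_term(t), ())}
--     return [c for c in _RECENT_CONTEXT_ALIAS_GROUPS if c in left_groups and c in right_groups]
-- ===== Notes on version B (the rewrite author's own statement) =====
-- stated objective: alternative
-- what changed: Replaces A's per-call, per-group alias-set normalization and set intersections with a precomputed inverted index (normalized alias term -> canonical groups): one index lookup per input term, then a membership filter over the canonical group names.
import Mathlib
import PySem

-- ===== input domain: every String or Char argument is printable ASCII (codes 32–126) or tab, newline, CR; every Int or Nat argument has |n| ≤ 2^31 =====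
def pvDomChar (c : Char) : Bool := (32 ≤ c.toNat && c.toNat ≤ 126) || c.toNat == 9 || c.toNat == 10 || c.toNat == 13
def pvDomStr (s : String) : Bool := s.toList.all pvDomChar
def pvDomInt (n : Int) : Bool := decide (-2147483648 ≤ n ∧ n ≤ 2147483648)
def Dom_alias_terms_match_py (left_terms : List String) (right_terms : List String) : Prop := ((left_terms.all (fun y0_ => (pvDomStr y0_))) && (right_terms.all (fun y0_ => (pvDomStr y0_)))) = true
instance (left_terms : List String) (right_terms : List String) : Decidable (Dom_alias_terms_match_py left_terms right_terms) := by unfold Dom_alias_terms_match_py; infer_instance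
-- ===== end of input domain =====

-- B replaces A's per-call, per-group alias-set normalization and set intersections with a
-- precomputed inverted index (normalized alias term -> canonical groups), one lookup per term.

-- ===== PORT A =====
-- shared module constants/helpers (_RECENT_CONTEXT_ALIAS_GROUPS, _norm_term)
def pvNorm (s : String) : String :=
  PySem.Str.join " " (PySem.Str.split₀ (PySem.Str.lower (PySem.Str.strip s)))

def pvGroups : List (String × List String) :=
  [("late night",
    ["late night", "late hours", "late night meals", "late night visits", "nightlife",
     "happy hour", "date night outings", "sit down dinner", "sit down meals"]),
   ("fast casual",
    ["fast casual", "fast casual meals", "quick casual meals", "weekday lunch",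
     "family friendly settings"]),
   ("group dining",
    ["group dining", "family friendly settings", "celebration", "sit down meals"])]

-- A: {_norm_term(t) for t in terms if _norm_term(t)}
def pvNormSet (terms : List String) : PySem.Set String :=
  PySem.Set.ofList ((terms.map pvNorm).filter (fun t => t != ""))

-- A: {_norm_term(canonical)} | {_norm_term(term) for term in aliases if _norm_term(term)}
def pvAliasNorms (p : String × List String) : PySem.Set String :=
  PySem.Set.union (PySem.Set.ofList [pvNorm p.1]) ((p.2.map pvNorm).filter (fun t => t != ""))

def alias_terms_match_py (left_terms : List String) (right_terms : List String) : List String :=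
  let left := pvNormSet left_terms
  let right := pvNormSet right_terms
  pvGroups.foldl (fun out p =>
    if PySem.Set.inter left (pvAliasNorms p) ≠ [] ∧ PySem.Set.inter right (pvAliasNorms p) ≠ []
    then out ++ [p.1] else out) []

-- ===== PORT B =====
-- B: inverted index built once over the alias groups: normalized term -> canonical groups
def pvIndex : PySem.Dict String (List String) :=
  pvGroups.foldl (fun d p =>
    (p.1 :: p.2).foldl (fun d term =>
      let t := pvNorm term
      if t = "" then d
      else
        let d := d.setdefault t []
        if (d.getD t []).contains p.1 then d
        else d.modify t [] (fun l => l ++ [p.1])) d)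
    PySem.Dict.empty

-- B: {g for t in terms for g in _ALIAS_INDEX.get(_norm_term(t), ())}
def pvGroupsHit (terms : List String) : PySem.Set String :=
  terms.foldl (fun s t => PySem.Set.update s (pvIndex.getD (pvNorm t) [])) PySem.Set.empty

def alias_terms_match_py_alt (left_terms : List String) (right_terms : List String) : List String :=
  let lg := pvGroupsHit left_terms
  let rg := pvGroupsHit right_terms
  (pvGroups.map Prod.fst).filter (fun c => PySem.Set.contains lg c && PySem.Set.contains rg c)

-- ===== PRECONDITION & SPEC =====
def Spec_alias_terms_match_py (left_terms : List String) (right_terms : List String) (out : List String) : Prop := out = alias_terms_match_py_alt left_terms right_terms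
instance (left_terms : List String) (right_terms : List String) (out : List String) : Decidable (Spec_alias_terms_match_py left_terms right_terms out) := by unfold Spec_alias_terms_match_py; infer_instance

-- ===== CLAIM (what is proved, stated in full; the proofs are below) =====
def Claim_equal_alias_terms_match_py : Prop := ∀ (left_terms : List String) (right_terms : List String), Dom_alias_terms_match_py left_terms right_terms → Spec_alias_terms_match_py left_terms right_terms (alias_terms_match_py left_terms right_terms)

-- ===== LEMMAS AND PROOFS =====

-- membership in B's accumulated group set
theorem mem_pvGroupsHit (l : List String) (y : String) :
    y ∈ pvGroupsHit l ↔ ∃ t ∈ l, y ∈ pvIndex.getD (pvNorm t) [] := by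
  have h : ∀ (init : PySem.Set String),
      y ∈ l.foldl (fun s t => PySem.Set.update s (pvIndex.getD (pvNorm t) [])) init ↔
        y ∈ init ∨ ∃ t ∈ l, y ∈ pvIndex.getD (pvNorm t) [] := by
    induction l with
    | nil => simp
    | cons a l ih =>
      intro init
      simp [List.foldl_cons, ih, PySem.Set.mem_update, or_assoc]
  simpa [pvGroupsHit] using h PySem.Set.empty

-- the inverted index as a literal dictionary (its fixed value)
set_option maxRecDepth 10000 in
theorem pvIndex_eq : pvIndex = PySem.Dict.mk
    [("late night", ["late night"]),
     ("late hours", ["late night"]),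
     ("late night meals", ["late night"]),
     ("late night visits", ["late night"]),
     ("nightlife", ["late night"]),
     ("happy hour", ["late night"]),
     ("date night outings", ["late night"]),
     ("sit down dinner", ["late night"]),
     ("sit down meals", ["late night", "group dining"]),
     ("fast casual", ["fast casual"]),
     ("fast casual meals", ["fast casual"]),
     ("quick casual meals", ["fast casual"]),
     ("weekday lunch", ["fast casual"]),
     ("family friendly settings", ["fast casual", "group dining"]),
     ("group dining", ["group dining"]),
     ("celebration", ["group dining"])] := by
  set_option maxHeartbeats 1000000 in decide

-- lookup in a literal dict with distinct keys
theorem mem_getD_mk {ν : Type} (g : ν) (s : String) (pairs : List (String × List ν))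
    (hnd : (pairs.map Prod.fst).Nodup) :
    g ∈ (PySem.Dict.mk pairs).getD s [] ↔ ∃ p ∈ pairs, p.1 = s ∧ g ∈ p.2 := by
  induction pairs with
  | nil => simp [PySem.Dict.getD_eq_get?_getD, PySem.Dict.get?]
  | cons a rest ih =>
    obtain ⟨k, v⟩ := a
    simp only [List.map_cons, List.nodup_cons] at hnd
    rw [PySem.Dict.getD_eq_get?_getD, PySem.Dict.get?_mk_cons]
    by_cases h : k = s
    · subst h
      simp only [beq_self_eq_true, if_pos, Option.getD_some]
      constructor
      · intro hg; exact ⟨(k, v), List.mem_cons_self, rfl, hg⟩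
      · rintro ⟨p, hp, hps, hg⟩
        rcases List.mem_cons.mp hp with rfl | hp'
        · exact hg
        · exact absurd (hps ▸ List.mem_map_of_mem (f := Prod.fst) hp') (by simpa using hnd.1)
    · rw [if_neg (by simpa using h), ← PySem.Dict.getD_eq_get?_getD, ih hnd.2]
      constructor
      · rintro ⟨p, hp, hps, hg⟩; exact ⟨p, List.mem_cons_of_mem _ hp, hps, hg⟩
      · rintro ⟨p, hp, hps, hg⟩
        rcases List.mem_cons.mp hp with rfl | hp'
        · exact absurd hps h
        · exact ⟨p, hp', hps, hg⟩

-- per-group characterization of an index lookup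
set_option maxHeartbeats 1000000 in
set_option maxRecDepth 10000 in
theorem idx_late (s : String) : "late night" ∈ pvIndex.getD s [] ↔
    s ∈ ["late night", "late hours", "late night meals", "late night visits", "nightlife",
         "happy hour", "date night outings", "sit down dinner", "sit down meals"] := by
  rw [pvIndex_eq, mem_getD_mk _ _ _ (by decide)]
  simp [eq_comm]

set_option maxHeartbeats 1000000 in
set_option maxRecDepth 10000 in
theorem idx_fast (s : String) : "fast casual" ∈ pvIndex.getD s [] ↔
    s ∈ ["fast casual", "fast casual meals", "quick casual meals", "weekday lunch",
         "family friendly settings"] := by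
  rw [pvIndex_eq, mem_getD_mk _ _ _ (by decide)]
  simp [eq_comm]

set_option maxHeartbeats 1000000 in
set_option maxRecDepth 10000 in
theorem idx_group (s : String) : "group dining" ∈ pvIndex.getD s [] ↔
    s ∈ ["group dining", "family friendly settings", "celebration", "sit down meals"] := by
  rw [pvIndex_eq, mem_getD_mk _ _ _ (by decide)]
  simp [eq_comm]
  tauto

-- one side's condition: A's nonempty intersection for a group vs B's membership in the hit set
theorem side_iff (l : List String) (S L : List String) (g : String)
    (hS : S = L) (hemp : "" ∉ L)
    (hidx : ∀ s, g ∈ pvIndex.getD s [] ↔ s ∈ L) :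
    PySem.Set.inter (pvNormSet l) S ≠ [] ↔ g ∈ pvGroupsHit l := by
  subst hS
  rw [mem_pvGroupsHit]
  rw [← List.isEmpty_eq_false_iff, List.isEmpty_eq_false_iff_exists_mem]
  constructor
  · rintro ⟨x, hx⟩
    rw [PySem.Set.mem_inter] at hx
    obtain ⟨hxl, hxS⟩ := hx
    simp only [pvNormSet, PySem.Set.mem_ofList, List.mem_filter, List.mem_map] at hxl
    obtain ⟨⟨t, ht, rfl⟩, _⟩ := hxl
    exact ⟨t, ht, (hidx _).mpr hxS⟩
  · rintro ⟨t, ht, hg⟩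
    rw [hidx] at hg
    refine ⟨pvNorm t, ?_⟩
    rw [PySem.Set.mem_inter]
    refine ⟨?_, hg⟩
    simp only [pvNormSet, PySem.Set.mem_ofList, List.mem_filter, List.mem_map, bne_iff_ne]
    exact ⟨⟨t, ht, rfl⟩, fun h => hemp (h ▸ hg)⟩

-- ===== VERDICT (by name: the statement is the Claim_ definition above) =====
theorem alias_terms_match_py_spec : Claim_equal_alias_terms_match_py := by
  intro lts rts _
  unfold Spec_alias_terms_match_py alias_terms_match_py alias_terms_match_py_alt
  rw [PySem.List.foldl_append_ite
      (p := fun p => PySem.Set.inter (pvNormSet lts) (pvAliasNorms p) ≠ [] ∧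
                     PySem.Set.inter (pvNormSet rts) (pvAliasNorms p) ≠ [])
      (f := Prod.fst)]
  rw [List.filter_map]
  rw [List.nil_append]
  refine congrArg (List.map Prod.fst) (List.filter_congr ?_).symm
  intro p hp
  have hmem : p = pvGroups[0] ∨ p = pvGroups[1] ∨ p = pvGroups[2] := by
    simpa [pvGroups] using hp
  have heq : ∀ (S L : List String) (hS : S = L) (hemp : "" ∉ L)
      (hidx : ∀ s, p.1 ∈ pvIndex.getD s [] ↔ s ∈ L),
      (PySem.Set.contains (pvGroupsHit lts) p.1 && PySem.Set.contains (pvGroupsHit rts) p.1) =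
        decide (PySem.Set.inter (pvNormSet lts) S ≠ [] ∧ PySem.Set.inter (pvNormSet rts) S ≠ []) := by
    intro S L hS hemp hidx
    rw [Bool.eq_iff_iff]
    simp only [Bool.and_eq_true, PySem.Set.contains_iff, decide_eq_true_iff]
    rw [← side_iff lts S L p.1 hS hemp hidx, ← side_iff rts S L p.1 hS hemp hidx]
  rcases hmem with rfl | rfl | rfl
  · exact heq _ _ (by decide) (by decide) idx_late
  · exact heq _ _ (by decide) (by decide) idx_fast
  · exact heq _ _ (by decide) (by decide) idx_group
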